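-- pv_equiv track=rewrite | github.com/williamszk/statistical-learning | data_structures_and_algorithms/mixed/220310_02_drive_the_car/python_solution/main.py | required
-- ===== SOURCE A (Python) =====
-- def required(arr, N, K):
--     extra_fuel = 0
--     for i in range(N):
--         if arr[i] > K:
--             diff_fuel = arr[i] - K
--
--             if diff_fuel > extra_fuel:
--                 extra_fuel = diff_fuel
--
--     if extra_fuel == 0:
--         return -1
--     else:
--         return extra_fuel
-- ===== SOURCE B (Python) =====
-- def required(arr, N, K):
--     if N <= 0:
--         return -1
--     xs = sorted(arr[:N], reverse=True)
--     if xs[0] > K: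
--         return xs[0] - K
--     return -1
-- ===== Notes on version B (the rewrite author's own statement) =====
-- stated objective: alternative
-- what changed: Replaces A's single-pass running-max-of-excesses loop by sorting the first N elements in descending order and inspecting the head (the largest element), then doing one comparison against K.
import Mathlib
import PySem

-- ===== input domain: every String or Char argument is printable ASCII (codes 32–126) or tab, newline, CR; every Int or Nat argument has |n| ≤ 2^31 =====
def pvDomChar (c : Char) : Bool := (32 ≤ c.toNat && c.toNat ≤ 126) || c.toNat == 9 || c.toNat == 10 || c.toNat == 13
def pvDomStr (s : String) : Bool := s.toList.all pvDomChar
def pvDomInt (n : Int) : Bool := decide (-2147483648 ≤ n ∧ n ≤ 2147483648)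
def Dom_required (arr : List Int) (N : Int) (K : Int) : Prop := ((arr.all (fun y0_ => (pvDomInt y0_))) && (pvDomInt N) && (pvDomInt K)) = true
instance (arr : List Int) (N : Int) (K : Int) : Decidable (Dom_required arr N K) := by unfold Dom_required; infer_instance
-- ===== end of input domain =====

-- B replaces A's running-max-of-excesses loop by sorting the first N elements
-- descending and inspecting the head (objective: alternative algorithm).

-- ===== PORT A =====
-- arr[i] ported as pyGetD arr i 0: under Pre_required every index 0 ≤ i < N ≤ len(arr)
-- is in range, so the default 0 is never used (A raises IndexError exactly outside Pre_).
def required (arr : List Int) (N : Int) (K : Int) : Int :=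
  let extra_fuel := (PySem.List.pyRange 0 N 1).foldl
    (fun extra_fuel i =>
      let a := PySem.List.pyGetD arr i 0
      if a > K then
        let diff_fuel := a - K
        if diff_fuel > extra_fuel then diff_fuel else extra_fuel
      else extra_fuel) 0
  if extra_fuel = 0 then -1 else extra_fuel

-- ===== PORT B =====
-- sorted(arr[:N], reverse=True) ported as PySem.List.sorted of the slice with identity
-- key, reverse := true; xs[0] ported as pyGetD xs 0 0: under Pre_required with 0 < N the
-- slice is nonempty, so the default 0 is never used (B raises IndexError there).
def required_alt (arr : List Int) (N : Int) (K : Int) : Int :=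
  if N ≤ 0 then -1
  else
    let xs := PySem.List.sorted (PySem.List.slice arr none (some N)) (fun y => y) true
    let x0 := PySem.List.pyGetD xs 0 0
    if x0 > K then x0 - K else -1

-- ===== PRECONDITION & SPEC =====
-- Pre_ excludes exactly the inputs where A raises IndexError: N larger than len(arr).
def Pre_required (arr : List Int) (N : Int) (K : Int) : Prop := N ≤ (arr.length : Int)
instance (arr : List Int) (N : Int) (K : Int) : Decidable (Pre_required arr N K) := by
  unfold Pre_required; infer_instance
def pvWitness_required : List Int × Int × Int := ([3, 1], 2, 1)

def Spec_required (arr : List Int) (N : Int) (K : Int) (out : Int) : Prop := out = required_alt arr N K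
instance (arr : List Int) (N : Int) (K : Int) (out : Int) : Decidable (Spec_required arr N K out) := by unfold Spec_required; infer_instance

-- ===== CLAIM (what is proved, stated in full; the proofs are below) =====
def Claim_equal_required : Prop := ∀ (arr : List Int) (N : Int) (K : Int), Dom_required arr N K → Pre_required arr N K → Spec_required arr N K (required arr N K)

-- ===== LEMMAS AND PROOFS =====

-- A's loop body equals the plain running max of (a - K), given a nonnegative accumulator.
theorem foldA_eq_foldg (K : Int) : ∀ (xs : List Int) (e : Int), 0 ≤ e →
    xs.foldl (fun ef a =>
      if a > K then (if a - K > ef then a - K else ef) else ef) e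
    = xs.foldl (fun ef a => max ef (a - K)) e := by
  intro xs
  induction xs with
  | nil => intro e _; rfl
  | cons a t ih =>
    intro e he
    simp only [List.foldl_cons]
    have hstep : (if a > K then (if a - K > e then a - K else e) else e) = max e (a - K) := by
      split_ifs <;> omega
    rw [hstep]
    exact ih _ (by omega)

-- The running max of (a - K) over a::t equals max e ((max of a::t) - K).
theorem foldg_eq_max (K : Int) : ∀ (t : List Int) (a e : Int),
    t.foldl (fun ef x => max ef (x - K)) (max e (a - K)) = max e (t.foldl max a - K) := by
  intro t
  induction t with
  | nil => intro a e; rfl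
  | cons b t' ih =>
    intro a e
    simp only [List.foldl_cons]
    have h1 : max (max e (a - K)) (b - K) = max e (max a b - K) := by omega
    rw [h1, ih]

theorem foldl_max_mem : ∀ (t : List Int) (x : Int), t.foldl max x ∈ x :: t := by
  intro t
  induction t with
  | nil => intro x; simp
  | cons b t' ih =>
    intro x
    simp only [List.foldl_cons]
    rcases List.mem_cons.1 (ih (max x b)) with h | h
    · rw [h]
      rcases le_total x b with hb | hb
      · simp [max_eq_right hb]
      · simp [max_eq_left hb]
    · simp [h]

theorem le_foldl_max : ∀ (t : List Int) (x y : Int), y ∈ x :: t → y ≤ t.foldl max x := by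
  intro t
  induction t with
  | nil => intro x y hy; simp at hy; simp [hy]
  | cons b t' ih =>
    intro x y hy
    simp only [List.foldl_cons]
    simp only [List.mem_cons] at hy
    rcases hy with rfl | rfl | hy
    · exact le_trans (le_max_left y b) (ih _ _ (by simp))
    · exact le_trans (le_max_right x y) (ih _ _ (by simp))
    · exact ih _ _ (by simp [hy])

-- head of the descending sort is the foldl max of the list
theorem sorted_rev_head_eq_foldl_max (x : Int) (t : List Int) (m : Int) (ms : List Int)
    (h : PySem.List.sorted (x :: t) (fun y => y) true = m :: ms) :
    m = t.foldl max x := by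
  have hub : ∀ y ∈ x :: t, y ≤ m := by
    intro y hy
    exact PySem.List.key_head_sorted_rev_ge (x :: t) (fun y => y) h y hy
  have hmem : m ∈ x :: t := by
    have : m ∈ PySem.List.sorted (x :: t) (fun y => y) true := by rw [h]; simp
    exact (PySem.List.mem_sorted _ _ _ _).1 this
  have h1 : m ≤ t.foldl max x := le_foldl_max t x m hmem
  have h2 : t.foldl max x ≤ m := hub _ (foldl_max_mem t x)
  omega

theorem required_eq (arr : List Int) (N K : Int) (hpre : N ≤ (arr.length : Int)) :
    required arr N K = required_alt arr N K := by
  unfold required required_alt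
  by_cases hN : N ≤ 0
  · rw [PySem.List.pyRange_one_eq_nil hN]
    simp [hN]
  · simp only [if_neg (by omega : ¬ N ≤ 0)]
    -- the slice is a nonempty prefix
    have hslice : PySem.List.slice arr none (some N) = arr.take N.toNat :=
      PySem.List.slice_to arr (by omega)
    have hlen : (arr.take N.toNat).length = N.toNat := by
      simp; omega
    obtain ⟨x, t, hxt⟩ : ∃ x t, arr.take N.toNat = x :: t := by
      cases h : arr.take N.toNat with
      | nil => exfalso; rw [h] at hlen; simp at hlen; omega
      | cons x t => exact ⟨x, t, rfl⟩
    -- rewrite A's range fold as a fold over the taken prefix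
    have hrange : PySem.List.pyRange 0 N 1
        = PySem.List.pyRange 0 ((arr.take N.toNat).length : Int) 1 := by
      rw [hlen]; congr 1; omega
    have hcongr : (PySem.List.pyRange 0 N 1).foldl
        (fun ef i =>
          let a := PySem.List.pyGetD arr i 0
          if a > K then (let d := a - K; if d > ef then d else ef) else ef) 0
        = (PySem.List.pyRange 0 N 1).foldl
        (fun ef i =>
          let a := PySem.List.pyGetD (arr.take N.toNat) i 0
          if a > K then (let d := a - K; if d > ef then d else ef) else ef) 0 := by
      apply PySem.List.foldl_congr_mem
      intro acc i hi
      have hib := (PySem.List.mem_pyRange_one).1 hi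
      have hget : PySem.List.pyGetD arr i 0 = PySem.List.pyGetD (arr.take N.toNat) i 0 := by
        rw [PySem.List.pyGetD_eq_getElem arr 0 hib.1 (by omega),
            PySem.List.pyGetD_eq_getElem (arr.take N.toNat) 0 hib.1 (by rw [hlen]; omega)]
        exact (List.getElem_take).symm
      simp only [hget]
    rw [hcongr, hrange,
        PySem.List.foldl_pyRange_zero_pyGetD' (arr.take N.toNat) 0
          (fun ef a => if a > K then (let d := a - K; if d > ef then d else ef) else ef) 0]
    rw [hslice, hxt]
    rw [foldA_eq_foldg K (x :: t) 0 le_rfl]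
    simp only [List.foldl_cons]
    have hm : t.foldl (fun ef a => max ef (a - K)) (max 0 (x - K))
        = max 0 (t.foldl max x - K) := foldg_eq_max K t x 0
    rw [hm]
    -- B's side: head of the descending sort
    obtain ⟨m, ms, hsort⟩ : ∃ m ms,
        PySem.List.sorted (x :: t) (fun y => y) true = m :: ms := by
      cases h : PySem.List.sorted (x :: t) (fun y => y) true with
      | nil => exact absurd ((PySem.List.sorted_eq_nil_iff _ _ _).1 h) (by simp)
      | cons m ms => exact ⟨m, ms, rfl⟩
    rw [hsort]
    have hmeq : m = t.foldl max x := sorted_rev_head_eq_foldl_max x t m ms hsort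
    rw [PySem.List.pyGetD_zero_cons]
    subst hmeq
    split_ifs <;> omega

-- ===== VERDICT (by name: the statement is the Claim_ definition above) =====
theorem required_spec : Claim_equal_required := by
  intro arr N K _ hpre
  unfold Spec_required
  exact required_eq arr N K hpre
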